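-- pv_equiv track=rewrite | github.com/JPHAJP/UR5_SRUB_NURSE | V2.0/app/services/voice_service.py | _normalize_with_index_map
-- ===== SOURCE A (Python) =====
-- import unicodedata
--
-- def _normalize_with_index_map(text: str) -> tuple[str, list[int]]:
--     normalized_chars: list[str] = []
--     index_map: list[int] = []
--     previous_was_space = False
--
--     for index, char in enumerate(text):
--         decomposed = unicodedata.normalize("NFKD", char)
--         ascii_chars = [piece for piece in decomposed if not unicodedata.combining(piece)]
--
--         for piece in ascii_chars:
--             lowered = piece.lower()
--             if lowered.isspace():
--                 if previous_was_space:
--                     continue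
--                 normalized_chars.append(" ")
--                 index_map.append(index)
--                 previous_was_space = True
--                 continue
--
--             normalized_chars.append(lowered)
--             index_map.append(index)
--             previous_was_space = False
--
--     return "".join(normalized_chars), index_map
-- ===== SOURCE B (Python) =====
-- def _normalize_with_index_map(text: str) -> tuple[str, list[int]]:
--     # Run-skipping scan: emit a single space per whitespace run (index of its first char),
--     # lowercase everything else; no previous_was_space flag needed.
--     parts: list[str] = []
--     index_map: list[int] = []
--     i = 0
--     n = len(text)
--     while i < n:
--         ch = text[i]
--         if ch.isspace():
--             parts.append(" ")
--             index_map.append(i)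
--             i += 1
--             while i < n and text[i].isspace():
--                 i += 1
--         else:
--             parts.append(ch.lower())
--             index_map.append(i)
--             i += 1
--     return "".join(parts), index_map
-- ===== Notes on version B (the rewrite author's own statement) =====
-- stated objective: simpler
-- what changed: Replaced A's per-piece loop with a previous_was_space flag (NFKD-decompose, filter combining marks, branch per piece) by a run-skipping index scan that emits a single space per whitespace run and lowercases everything else, with no flag state.
import Mathlib
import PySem

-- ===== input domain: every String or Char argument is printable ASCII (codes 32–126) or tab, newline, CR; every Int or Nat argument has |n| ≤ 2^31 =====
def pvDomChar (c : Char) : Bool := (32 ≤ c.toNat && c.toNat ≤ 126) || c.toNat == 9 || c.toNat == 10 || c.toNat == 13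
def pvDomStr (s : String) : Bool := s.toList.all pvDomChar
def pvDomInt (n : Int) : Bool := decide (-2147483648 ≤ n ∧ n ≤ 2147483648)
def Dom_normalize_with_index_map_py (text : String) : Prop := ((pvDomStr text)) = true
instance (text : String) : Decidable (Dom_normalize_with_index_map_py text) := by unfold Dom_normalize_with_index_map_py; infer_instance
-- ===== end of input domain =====

-- B replaces A's per-piece loop with previous_was_space flag by a run-skipping scan
-- (a single space per whitespace run); objective: simpler on the ASCII domain.

-- ===== PORT A =====
-- unicodedata.normalize("NFKD", char): identity on the printable-ASCII/tab/newline/CR domain (exact there)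
def pvNfkd (c : Char) : List Char := [c]
-- unicodedata.combining(piece): 0 (falsy) on the printable-ASCII/tab/newline/CR domain (exact there)
def pvCombining (_c : Char) : Bool := false

-- body of A's 'for piece in ascii_chars'; state = (normalized_chars, index_map, previous_was_space)
def pvStepA (i : Int) (st : List Char × List Int × Bool) (piece : Char) :
    List Char × List Int × Bool :=
  let lowered := PySem.Chars.lowerChar piece
  if PySem.Chars.isspace lowered then
    if st.2.2 then st
    else (st.1 ++ [' '], st.2.1 ++ [i], true)
  else (st.1 ++ [lowered], st.2.1 ++ [i], false)

def normalize_with_index_map_py (text : String) : String × List Int :=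
  let final := (PySem.List.enumerate text.toList 0).foldl
    (fun st ic =>
      let decomposed := pvNfkd ic.2
      let ascii_chars := decomposed.filter (fun piece => !pvCombining piece)
      ascii_chars.foldl (pvStepA ic.1) st)
    ([], [], false)
  (String.ofList final.1, final.2.1)

-- ===== PORT B =====
-- inner 'while i < n and text[i].isspace(): i += 1' — returns (remaining chars, next index)
def pvSkipWs : List Char → Int → List Char × Int
  | [], i => ([], i)
  | c :: rest, i =>
    if PySem.Chars.isspace c then pvSkipWs rest (i + 1) else (c :: rest, i)

theorem pvSkipWs_len_le (l : List Char) (i : Int) : (pvSkipWs l i).1.length ≤ l.length := by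
  induction l generalizing i with
  | nil => simp [pvSkipWs]
  | cons c rest ih =>
    simp only [pvSkipWs]
    split
    · exact le_trans (ih _) (Nat.le_succ _)
    · simp

-- outer 'while i < n' loop of B, consuming the remaining characters
def pvGoB : List Char → Int → List Char × List Int
  | [], _ => ([], [])
  | c :: rest, i =>
    if PySem.Chars.isspace c then
      let s := pvSkipWs rest (i + 1)
      let r := pvGoB s.1 s.2
      (' ' :: r.1, i :: r.2)
    else
      let r := pvGoB rest (i + 1)
      (PySem.Chars.lowerChar c :: r.1, i :: r.2)
  termination_by l _ => l.length
  decreasing_by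
  · exact Nat.lt_succ_of_le (pvSkipWs_len_le rest (i + 1))
  · simp

def normalize_with_index_map_py_alt (text : String) : String × List Int :=
  let r := pvGoB text.toList 0
  (String.ofList r.1, r.2)

-- ===== PRECONDITION & SPEC =====
def Spec_normalize_with_index_map_py (text : String) (out : String × List Int) : Prop := out = normalize_with_index_map_py_alt text
instance (text : String) (out : String × List Int) : Decidable (Spec_normalize_with_index_map_py text out) := by unfold Spec_normalize_with_index_map_py; infer_instance

-- ===== CLAIM (what is proved, stated in full; the proofs are below) =====
def Claim_equal_normalize_with_index_map_py : Prop := ∀ (text : String), Dom_normalize_with_index_map_py text → Spec_normalize_with_index_map_py text (normalize_with_index_map_py text)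

-- ===== LEMMAS AND PROOFS =====

theorem pvCharA : ('A'.val.toNat) = 65 := rfl
theorem pvCharZ : ('Z'.val.toNat) = 90 := rfl

theorem pvLower_eq_of_space (c : Char) (h : PySem.Chars.isspace c = true) :
    PySem.Chars.lowerChar c = c := by
  simp only [PySem.Chars.lowerChar, PySem.Chars.isupper, PySem.Chars.isspace] at *
  split <;> [skip; rfl]
  rename_i hu
  simp only [Bool.and_eq_true, decide_eq_true_eq, Char.le_def, UInt32.le_iff_toNat_le,
    pvCharA, pvCharZ] at hu
  simp only [Bool.or_eq_true, Bool.and_eq_true, decide_eq_true_eq, Char.toNat] at h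
  exact absurd h (by omega)

theorem pvToNat_ofNat (n : Nat) (h : 97 ≤ n) (h2 : n ≤ 122) : (Char.ofNat n).toNat = n := by
  unfold Char.ofNat
  rw [dif_pos (by left; omega)]
  simp only [Char.ofNatAux, Char.toNat, UInt32.toNat, BitVec.toNat_ofNatLT]

-- lowercasing never creates or destroys whitespace
theorem pvLower_isspace (c : Char) :
    PySem.Chars.isspace (PySem.Chars.lowerChar c) = PySem.Chars.isspace c := by
  by_cases h : PySem.Chars.isspace c = true
  · rw [pvLower_eq_of_space c h]
  · simp only [Bool.not_eq_true] at h
    rw [h]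
    simp only [PySem.Chars.lowerChar]
    split <;> [skip; exact h]
    rename_i hu
    simp only [PySem.Chars.isupper, Bool.and_eq_true, decide_eq_true_eq, Char.le_def,
      UInt32.le_iff_toNat_le, pvCharA, pvCharZ] at hu
    simp only [PySem.Chars.isspace]
    rw [pvToNat_ofNat _ (by simp only [Char.toNat]; omega) (by simp only [Char.toNat]; omega)]
    simp only [Char.toNat] at *
    simp only [Bool.or_eq_false_iff, Bool.and_eq_false_iff, decide_eq_false_iff_not]
    omega

-- A's per-character body is pvStepA on the single surviving piece
theorem pvBodyA (st : List Char × List Int × Bool) (i : Int) (c : Char) :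
    ((pvNfkd c).filter (fun piece => !pvCombining piece)).foldl (pvStepA i) st
      = pvStepA i st c := by
  simp [pvNfkd, pvCombining]

-- with the flag set, A's loop skips exactly the whitespace pvSkipWs skips
theorem pvFoldA_true_skip (l : List Char) (i : Int) (out : List Char) (idx : List Int) :
    (PySem.List.enumerate l i).foldl (fun st ic => pvStepA ic.1 st ic.2) (out, idx, true)
      = (PySem.List.enumerate (pvSkipWs l i).1 (pvSkipWs l i).2).foldl
          (fun st ic => pvStepA ic.1 st ic.2) (out, idx, true) := by
  induction l generalizing i with
  | nil => simp [pvSkipWs]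
  | cons c rest ih =>
    by_cases h : PySem.Chars.isspace c = true
    · rw [PySem.List.enumerate_cons]
      simp only [List.foldl_cons, pvSkipWs, h, if_pos]
      have hstep : pvStepA i (out, idx, true) c = (out, idx, true) := by
        simp [pvStepA, pvLower_isspace, h]
      rw [hstep, ih]
    · simp [pvSkipWs, h]

-- the remainder pvSkipWs leaves starts with a non-space (if nonempty)
theorem pvSkipWs_head (l : List Char) (i : Int) (c : Char) (rest : List Char)
    (h : (pvSkipWs l i).1 = c :: rest) : PySem.Chars.isspace c = false := by
  induction l generalizing i with
  | nil => simp [pvSkipWs] at h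
  | cons d tl ih =>
    simp only [pvSkipWs] at h
    split at h
    · exact ih _ h
    · rename_i hd
      cases h
      simpa using hd


-- main correspondence: A's fold with the flag clear computes B's run-skipping scan
theorem pvMain (n : Nat) :
    ∀ (l : List Char), l.length ≤ n → ∀ (i : Int) (out : List Char) (idx : List Int),
      (((PySem.List.enumerate l i).foldl (fun st ic => pvStepA ic.1 st ic.2) (out, idx, false)).1,
       ((PySem.List.enumerate l i).foldl (fun st ic => pvStepA ic.1 st ic.2) (out, idx, false)).2.1)
        = (out ++ (pvGoB l i).1, idx ++ (pvGoB l i).2) := by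
  induction n with
  | zero =>
    intro l hl i out idx
    have : l = [] := List.length_eq_zero_iff.mp (Nat.le_zero.mp hl)
    subst this
    simp [pvGoB]
  | succ n ih =>
    intro l hl i out idx
    cases l with
    | nil => simp [pvGoB]
    | cons c rest =>
      simp only [List.length_cons, Nat.succ_le_succ_iff] at hl
      by_cases h : PySem.Chars.isspace c = true
      · -- whitespace: A sets the flag; flagged fold skips the run like pvSkipWs
        rw [PySem.List.enumerate_cons]
        simp only [List.foldl_cons]
        have hstep : pvStepA i (out, idx, false) c = (out ++ [' '], idx ++ [i], true) := by
          simp [pvStepA, pvLower_isspace, h]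
        rw [hstep, pvFoldA_true_skip]
        -- after the skip the head (if any) is non-space, so flag true behaves as false
        have hrec :
            (((PySem.List.enumerate (pvSkipWs rest (i+1)).1 (pvSkipWs rest (i+1)).2).foldl
                (fun st ic => pvStepA ic.1 st ic.2) (out ++ [' '], idx ++ [i], true)).1,
             ((PySem.List.enumerate (pvSkipWs rest (i+1)).1 (pvSkipWs rest (i+1)).2).foldl
                (fun st ic => pvStepA ic.1 st ic.2) (out ++ [' '], idx ++ [i], true)).2.1)
              = (out ++ [' '] ++ (pvGoB (pvSkipWs rest (i+1)).1 (pvSkipWs rest (i+1)).2).1,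
                 idx ++ [i] ++ (pvGoB (pvSkipWs rest (i+1)).1 (pvSkipWs rest (i+1)).2).2) := by
          cases hs : (pvSkipWs rest (i+1)).1 with
          | nil => simp [pvGoB]
          | cons d tl =>
            have hd : PySem.Chars.isspace d = false := pvSkipWs_head _ _ _ _ hs
            rw [PySem.List.enumerate_cons]
            simp only [List.foldl_cons]
            have h1 : pvStepA (pvSkipWs rest (i+1)).2 (out ++ [' '], idx ++ [i], true) d
                = (out ++ [' '] ++ [PySem.Chars.lowerChar d],
                   idx ++ [i] ++ [(pvSkipWs rest (i+1)).2], false) := by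
              simp [pvStepA, pvLower_isspace, hd]
            rw [h1]
            have htl : tl.length ≤ n := by
              have := pvSkipWs_len_le rest (i+1)
              rw [hs] at this
              simp at this
              omega
            rw [ih tl htl]
            simp only [pvGoB, hd, Bool.false_eq_true, if_false]
            simp [List.append_assoc]
        rw [hrec]
        simp only [pvGoB, h, if_pos]
        simp [List.append_assoc]
      · -- non-space: both emit the lowered char and continue
        rw [PySem.List.enumerate_cons]
        simp only [List.foldl_cons]
        simp only [Bool.not_eq_true] at h
        have hstep : pvStepA i (out, idx, false) c
            = (out ++ [PySem.Chars.lowerChar c], idx ++ [i], false) := by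
          simp [pvStepA, pvLower_isspace, h]
        rw [hstep, ih rest hl]
        simp only [pvGoB, h, Bool.false_eq_true, if_false]
        simp [List.append_assoc]

-- ===== VERDICT (by name: the statement is the Claim_ definition above) =====
theorem normalize_with_index_map_py_spec : Claim_equal_normalize_with_index_map_py := by
  intro text _
  unfold Spec_normalize_with_index_map_py normalize_with_index_map_py normalize_with_index_map_py_alt
  simp only [pvBodyA]
  have := pvMain text.toList.length text.toList le_rfl 0 [] []
  simp only [List.nil_append] at this
  rw [Prod.ext_iff] at this ⊢
  exact ⟨congrArg String.ofList this.1, this.2⟩
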